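-- pv_equiv track=rewrite | github.com/SchriderLab/popgenml | popgenml/data/io_.py | processedIntrogressedAlleles
-- ===== SOURCE A (Python) =====
-- def processedIntrogressedAlleles(ls):
--     ls.sort()
--     if len(ls) == 0:
--         return []
--     else:
--         runs = []
--         runStart = ls[0]
--         for i in range(1, len(ls)):
--             if ls[i] > ls[i-1]+1:
--                 runEnd = ls[i-1]
--                 runs.append((runStart, runEnd))
--                 runStart = ls[i]
--         runs.append((runStart, ls[-1]))
--     return runs
-- ===== SOURCE B (Python) =====
-- def processedIntrogressedAlleles(ls):
--     ls.sort()
--     if len(ls) == 0: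
--         return []
--     cuts = [0] + [i for i in range(1, len(ls)) if ls[i] > ls[i - 1] + 1] + [len(ls)]
--     return [(ls[s], ls[e - 1]) for s, e in zip(cuts, cuts[1:])]
-- ===== Notes on version B (the rewrite author's own statement) =====
-- stated objective: alternative
-- what changed: Replaces the single scan that threads a running runStart accumulator with a two-phase cut-point construction: first collect all breakpoint indices, then shape the runs by zipping consecutive cuts.
import Mathlib
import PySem

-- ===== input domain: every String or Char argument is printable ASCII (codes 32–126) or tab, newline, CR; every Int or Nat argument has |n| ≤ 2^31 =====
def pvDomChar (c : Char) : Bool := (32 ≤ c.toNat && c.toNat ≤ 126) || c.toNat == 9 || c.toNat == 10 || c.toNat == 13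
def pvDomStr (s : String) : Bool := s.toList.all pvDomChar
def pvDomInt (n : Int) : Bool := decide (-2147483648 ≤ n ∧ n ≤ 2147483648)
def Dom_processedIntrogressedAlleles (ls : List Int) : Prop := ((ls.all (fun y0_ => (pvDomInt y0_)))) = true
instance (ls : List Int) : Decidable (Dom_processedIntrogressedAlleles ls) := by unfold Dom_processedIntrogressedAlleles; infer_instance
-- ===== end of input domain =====

-- B collapses the sorted list into runs by first collecting all breakpoint indices and then
-- zipping consecutive cuts, instead of threading a running runStart through one scan (same cost).
-- Both Pythons sort ls IN PLACE (ls.sort()); the equivalence proved here is about the return value.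

-- ===== PORT A =====
def processedIntrogressedAlleles (ls : List Int) : List (Int × Int) :=
  let s := PySem.List.sorted ls (fun x => x) false
  if s.length == 0 then []
  else
    let st := (PySem.List.pyRange 1 (s.length : Int) 1).foldl
      (fun (acc : List (Int × Int) × Int) i =>
        if PySem.List.pyGetD s i 0 > PySem.List.pyGetD s (i - 1) 0 + 1 then
          (acc.1 ++ [(acc.2, PySem.List.pyGetD s (i - 1) 0)], PySem.List.pyGetD s i 0)
        else acc)
      ([], PySem.List.pyGetD s 0 0)
    st.1 ++ [(st.2, PySem.List.pyGetD s (-1) 0)]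

-- ===== PORT B =====
def processedIntrogressedAlleles_alt (ls : List Int) : List (Int × Int) :=
  let s := PySem.List.sorted ls (fun x => x) false
  if s.length == 0 then []
  else
    let cuts : List Int :=
      0 :: ((PySem.List.pyRange 1 (s.length : Int) 1).filter
              (fun i => decide (PySem.List.pyGetD s i 0 > PySem.List.pyGetD s (i - 1) 0 + 1))
            ++ [(s.length : Int)])
    (cuts.zip cuts.tail).map
      (fun p => (PySem.List.pyGetD s p.1 0, PySem.List.pyGetD s (p.2 - 1) 0))

-- ===== PRECONDITION & SPEC =====
def Spec_processedIntrogressedAlleles (ls : List Int) (out : List (Int × Int)) : Prop := out = processedIntrogressedAlleles_alt ls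
instance (ls : List Int) (out : List (Int × Int)) : Decidable (Spec_processedIntrogressedAlleles ls out) := by unfold Spec_processedIntrogressedAlleles; infer_instance

-- ===== CLAIM (what is proved, stated in full; the proofs are below) =====
def Claim_equal_processedIntrogressedAlleles : Prop := ∀ (ls : List Int), Dom_processedIntrogressedAlleles ls → Spec_processedIntrogressedAlleles ls (processedIntrogressedAlleles ls)

-- ===== LEMMAS AND PROOFS =====

-- Common reference: runs of s starting at cut index c, with k indices n-k, …, n-1 left to scan.
def pvRuns (s : List Int) : Nat → Int → List (Int × Int)
  | 0, c => [(PySem.List.pyGetD s c 0, PySem.List.pyGetD s ((s.length : Int) - 1) 0)]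
  | k + 1, c =>
    let j : Int := (s.length : Int) - (k + 1)
    if PySem.List.pyGetD s j 0 > PySem.List.pyGetD s (j - 1) 0 + 1 then
      (PySem.List.pyGetD s c 0, PySem.List.pyGetD s (j - 1) 0) :: pvRuns s k j
    else pvRuns s k c

theorem pvGetD_neg_one (s : List Int) (d : Int) :
    PySem.List.pyGetD s (-1) d = PySem.List.pyGetD s ((s.length : Int) - 1) d := by
  cases s with
  | nil => rfl
  | cons x t =>
    simp [PySem.List.pyGetD, PySem.List.pyGet?, PySem.List.pyIdx?]

theorem pvA_loop (s : List Int) (k : Nat) (c : Int) (runs : List (Int × Int)) :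
    (let st := (PySem.List.pyRange ((s.length : Int) - k) (s.length : Int) 1).foldl
      (fun (acc : List (Int × Int) × Int) i =>
        if PySem.List.pyGetD s i 0 > PySem.List.pyGetD s (i - 1) 0 + 1 then
          (acc.1 ++ [(acc.2, PySem.List.pyGetD s (i - 1) 0)], PySem.List.pyGetD s i 0)
        else acc)
      (runs, PySem.List.pyGetD s c 0)
     st.1 ++ [(st.2, PySem.List.pyGetD s (-1) 0)]) = runs ++ pvRuns s k c := by
  induction k generalizing c runs with
  | zero =>
    rw [PySem.List.pyRange_one_eq_nil (by omega)]
    simp [pvRuns, pvGetD_neg_one]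
  | succ k ih =>
    have hc1 : ((k + 1 : Nat) : Int) = (k : Int) + 1 := by push_cast; ring
    have h1 : (s.length : Int) - ((k : Int) + 1) + 1 = (s.length : Int) - (k : Int) := by ring
    rw [PySem.List.pyRange_one_cons (by omega)]
    simp only [List.foldl_cons, hc1, h1]
    by_cases hb : PySem.List.pyGetD s ((s.length : Int) - ((k : Int) + 1)) 0 >
        PySem.List.pyGetD s ((s.length : Int) - ((k : Int) + 1) - 1) 0 + 1
    · rw [if_pos hb]
      have := ih ((s.length : Int) - ((k : Int) + 1))
        (runs ++ [(PySem.List.pyGetD s c 0, PySem.List.pyGetD s ((s.length : Int) - ((k : Int) + 1) - 1) 0)])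
      simp only at this ⊢
      rw [this]
      simp [pvRuns, hb]
    · rw [if_neg hb]
      have := ih c runs
      simp only at this ⊢
      rw [this]
      simp [pvRuns, hb]

theorem pvB_loop (s : List Int) (k : Nat) (c : Int) :
    (let L := (PySem.List.pyRange ((s.length : Int) - k) (s.length : Int) 1).filter
        (fun i => decide (PySem.List.pyGetD s i 0 > PySem.List.pyGetD s (i - 1) 0 + 1))
      ++ [(s.length : Int)]
     ((c :: L).zip L).map
      (fun p => (PySem.List.pyGetD s p.1 0, PySem.List.pyGetD s (p.2 - 1) 0))) = pvRuns s k c := by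
  induction k generalizing c with
  | zero =>
    rw [PySem.List.pyRange_one_eq_nil (by omega)]
    simp [pvRuns]
  | succ k ih =>
    have hc1 : ((k + 1 : Nat) : Int) = (k : Int) + 1 := by push_cast; ring
    have h1 : (s.length : Int) - ((k : Int) + 1) + 1 = (s.length : Int) - (k : Int) := by ring
    rw [PySem.List.pyRange_one_cons (by omega)]
    simp only [List.filter_cons, decide_eq_true_eq, hc1, h1]
    by_cases hb : PySem.List.pyGetD s ((s.length : Int) - ((k : Int) + 1)) 0 >
        PySem.List.pyGetD s ((s.length : Int) - ((k : Int) + 1) - 1) 0 + 1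
    · rw [if_pos hb]
      simp only [List.cons_append, List.zip_cons_cons, List.map_cons]
      have := ih ((s.length : Int) - ((k : Int) + 1))
      simp only at this
      rw [this]
      simp [pvRuns, hb]
    · rw [if_neg hb]
      have := ih c
      simp only at this
      rw [this]
      simp [pvRuns, hb]

-- ===== VERDICT (by name: the statement is the Claim_ definition above) =====
theorem processedIntrogressedAlleles_spec : Claim_equal_processedIntrogressedAlleles := by
  intro ls _
  unfold Spec_processedIntrogressedAlleles processedIntrogressedAlleles processedIntrogressedAlleles_alt
  set s := PySem.List.sorted ls (fun x => x) false with hs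
  by_cases h : s.length = 0
  · simp [h]
  · simp only [h, beq_iff_eq, if_false, List.tail_cons]
    have hk : (s.length : Int) - ((s.length - 1 : Nat) : Int) = 1 := by
      omega
    have hA := pvA_loop s (s.length - 1) 0 []
    have hB := pvB_loop s (s.length - 1) 0
    rw [hk] at hA hB
    simp only at hA hB ⊢
    rw [hA, hB]
    simp
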